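-- pv_equiv track=rewrite | github.com/Dare-marvel/Cryptography-and-System-Security--CSS-- | EXPERIMENTS/Transposition Techniques/substitution-techniques-attack-2021300101/ColumnarAttack.py | brute_force_columnar_transposition
-- ===== SOURCE A (Python) =====
-- from itertools import permutations
--
-- def decrypt_columnar_transposition(ciphertext, column_order, num_columns):
--     # Calculate the number of rows
--     num_rows = len(ciphertext) // num_columns
--
--     # Create an empty matrix to store the characters
--     matrix = ['' for _ in range(num_columns)]
--
--     # Distribute characters into columns based on the provided order
--     k = 0
--     for col in column_order:
--         for row in range(num_rows):
--             matrix[col] += ciphertext[k]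
--             k += 1
--
--     plaintext = ''.join([''.join(row) for row in zip(*matrix)])
--     return plaintext
--
-- def brute_force_columnar_transposition(ciphertext):
--     possible_plaintexts = []
--     for num_columns in range(2, len(ciphertext)):
--         if len(ciphertext) % num_columns == 0:
--             # Generate all possible column permutations
--             for column_order in permutations(range(num_columns)):
--                 decrypted_text = decrypt_columnar_transposition(
--                     ciphertext, column_order, num_columns)
--                 possible_plaintexts.append(
--                     (num_columns, column_order, decrypted_text))
--     return possible_plaintexts
-- ===== SOURCE B (Python) =====
-- from itertools import permutations
--
-- def brute_force_columnar_transposition(ciphertext):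
--     # Gather formulation: invert the column permutation once, then read each
--     # plaintext position directly out of the ciphertext (no matrix, no zip).
--     n = len(ciphertext)
--     results = []
--     for num_columns in range(2, n):
--         if n % num_columns == 0:
--             num_rows = n // num_columns
--             for column_order in permutations(range(num_columns)):
--                 inv = [0] * num_columns
--                 for i, col in enumerate(column_order):
--                     inv[col] = i
--                 plaintext = ''.join(
--                     ciphertext[inv[p % num_columns] * num_rows + p // num_columns]
--                     for p in range(n))
--                 results.append((num_columns, column_order, plaintext))
--     return results
-- ===== Notes on version B (the rewrite author's own statement) =====
-- stated objective: alternative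
-- what changed: Decryption no longer builds per-column strings with a running cursor and zip-transposes them; B inverts the column permutation once and gathers each plaintext character directly from the ciphertext by index arithmetic (inv[p%cols]*rows + p//cols).
import Mathlib
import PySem

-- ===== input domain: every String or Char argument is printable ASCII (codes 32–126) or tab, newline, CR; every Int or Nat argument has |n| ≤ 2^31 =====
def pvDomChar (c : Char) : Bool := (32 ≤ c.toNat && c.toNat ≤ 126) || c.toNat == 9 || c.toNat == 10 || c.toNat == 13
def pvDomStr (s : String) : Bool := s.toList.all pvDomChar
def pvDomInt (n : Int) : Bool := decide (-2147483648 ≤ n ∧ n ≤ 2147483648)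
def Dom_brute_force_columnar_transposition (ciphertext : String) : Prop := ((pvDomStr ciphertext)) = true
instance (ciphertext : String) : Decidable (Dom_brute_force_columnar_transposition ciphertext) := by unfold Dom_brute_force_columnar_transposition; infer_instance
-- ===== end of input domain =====

-- B replaces A's per-column string accumulation + zip-transpose by a single gather pass
-- through an inverted column permutation (alternative structure, same cost).

-- itertools.permutations(l): all pairs (chosen head, remaining elements), in order
def pvSelections (l : List Int) : List (Int × List Int) :=
  match l with
  | [] => []
  | x :: xs => (x, xs) :: (pvSelections xs).map (fun p => (p.1, x :: p.2))

theorem pvSelections_length_mem : ∀ (l : List Int) (p : Int × List Int), p ∈ pvSelections l → p.2.length + 1 = l.length := by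
  intro l
  induction l with
  | nil => intro p h; simp [pvSelections] at h
  | cons x xs ih =>
    intro p h
    simp only [pvSelections, List.mem_cons, List.mem_map] at h
    rcases h with h | ⟨q, hq, rfl⟩
    · subst h; simp
    · have := ih q hq; simp [List.length_cons]; omega

-- itertools.permutations(range(m)) in itertools (lexicographic-by-index) order
def pvPermutations (l : List Int) : List (List Int) :=
  match l with
  | [] => [[]]
  | x :: xs =>
    (pvSelections (x :: xs)).attach.flatMap (fun p => (pvPermutations p.1.2).map (fun q => p.1.1 :: q))
termination_by l.length
decreasing_by
  have := pvSelections_length_mem (x :: xs) p.1 p.2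
  simp_all

-- ===== PORT A =====
-- decrypt_columnar_transposition, transliterated: distribute ciphertext chars into
-- matrix[col] column by column with cursor k, then zip(*matrix) and join.
-- (the pyGet? ... .getD ' ' index is always in range on inputs reached from
-- brute_force_columnar_transposition; Python would raise IndexError otherwise)
def pvDecryptA (ciphertext : String) (column_order : List Int) (num_columns : Int) : String :=
  let ct := ciphertext.toList
  let num_rows := PySem.Int.floordiv ct.length num_columns
  let matrix0 : List (List Char) := (PySem.List.pyRange 0 num_columns 1).map (fun _ => [])
  let st := column_order.foldl (fun (st : List (List Char) × Int) col =>
      (PySem.List.pyRange 0 num_rows 1).foldl (fun (st2 : List (List Char) × Int) _row =>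
        let c := (PySem.List.pyGet? ct st2.2).getD ' '
        (PySem.List.pySetD st2.1 col (PySem.List.pyGetD st2.1 col [] ++ [c]), st2.2 + 1)) st)
    (matrix0, 0)
  let matrix := st.1
  -- zip(*matrix): rows up to the shortest column, then ''.join of the joined rows
  let minLen := match matrix with
    | [] => 0
    | s :: rest => rest.foldl (fun a t => min a t.length) s.length
  String.ofList ((List.range minLen).map (fun r => matrix.map (fun s => s.getD r ' '))).flatten

def brute_force_columnar_transposition (ciphertext : String) : List (Int × List Int × String) :=
  let n : Int := ciphertext.toList.length
  (PySem.List.pyRange 2 n 1).foldl (fun acc num_columns =>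
    if PySem.Int.mod n num_columns = 0 then
      (pvPermutations (PySem.List.pyRange 0 num_columns 1)).foldl (fun acc2 column_order =>
        acc2 ++ [(num_columns, column_order, pvDecryptA ciphertext column_order num_columns)]) acc
    else acc) []

-- ===== PORT B =====
def brute_force_columnar_transposition_alt (ciphertext : String) : List (Int × List Int × String) :=
  let ct := ciphertext.toList
  let n : Int := ct.length
  (PySem.List.pyRange 2 n 1).foldl (fun acc num_columns =>
    if PySem.Int.mod n num_columns = 0 then
      let num_rows := PySem.Int.floordiv n num_columns
      (pvPermutations (PySem.List.pyRange 0 num_columns 1)).foldl (fun acc2 column_order =>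
        let inv := (PySem.List.enumerate column_order 0).foldl
          (fun inv p => PySem.List.pySetD inv p.2 p.1) (List.replicate num_columns.toNat (0 : Int))
        let plaintext := (PySem.List.pyRange 0 n 1).map (fun p =>
          (PySem.List.pyGet? ct
            (PySem.List.pyGetD inv (PySem.Int.mod p num_columns) 0 * num_rows
              + PySem.Int.floordiv p num_columns)).getD ' ')
        acc2 ++ [(num_columns, column_order, String.ofList plaintext)]) acc
    else acc) []

-- ===== PRECONDITION & SPEC =====
def Spec_brute_force_columnar_transposition (ciphertext : String) (out : List (Int × List Int × String)) : Prop := out = brute_force_columnar_transposition_alt ciphertext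
instance (ciphertext : String) (out : List (Int × List Int × String)) : Decidable (Spec_brute_force_columnar_transposition ciphertext out) := by unfold Spec_brute_force_columnar_transposition; infer_instance

-- ===== CLAIM (what is proved, stated in full; the proofs are below) =====
def Claim_equal_brute_force_columnar_transposition : Prop := ∀ (ciphertext : String), Dom_brute_force_columnar_transposition ciphertext → Spec_brute_force_columnar_transposition ciphertext (brute_force_columnar_transposition ciphertext)

-- ===== LEMMAS AND PROOFS =====

theorem pvSelections_perm : ∀ (l : List Int) (p : Int × List Int), p ∈ pvSelections l → (p.1 :: p.2).Perm l := by
  intro l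
  induction l with
  | nil => intro p h; simp [pvSelections] at h
  | cons x xs ih =>
    intro p h
    simp only [pvSelections, List.mem_cons, List.mem_map] at h
    rcases h with rfl | ⟨q, hq, rfl⟩
    · exact List.Perm.refl _
    · have hperm := ih q hq
      exact List.Perm.trans (List.Perm.swap x q.1 q.2) (List.Perm.cons x hperm)

theorem pvPermutations_perm : ∀ (l : List Int) (q : List Int), q ∈ pvPermutations l → q.Perm l := by
  have main : ∀ (n : Nat) (l : List Int), l.length ≤ n → ∀ q ∈ pvPermutations l, q.Perm l := by
    intro n
    induction n with
    | zero =>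
      intro l hl q hq
      have : l = [] := List.eq_nil_of_length_eq_zero (by omega)
      subst this
      simp [pvPermutations] at hq
      subst hq; exact List.Perm.refl _
    | succ n ih =>
      intro l hl q hq
      match l with
      | [] => simp [pvPermutations] at hq; subst hq; exact List.Perm.refl _
      | x :: xs =>
        simp only [pvPermutations, List.mem_flatMap, List.mem_map, List.mem_attach,
          true_and, Subtype.exists] at hq
        obtain ⟨p, hp, q', hq', rfl⟩ := hq
        have hlen := pvSelections_length_mem (x :: xs) p hp
        have hq'p : q'.Perm p.2 := ih p.2 (by simp at hlen hl ⊢; omega) q' hq'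
        have := pvSelections_perm (x :: xs) p hp
        exact List.Perm.trans (List.Perm.cons p.1 hq'p) this
  intro l q hq
  exact main l.length l le_rfl q hq

-- the character block ciphertext[a : a+R] (as total getD reads)
def pvChunk (ct : List Char) (a R : Nat) : List Char :=
  (List.range R).map (fun t => ct.getD (a + t) ' ')

-- A's inner row loop: appends one chunk to matrix[col] and advances the cursor by R
theorem pv_inner (ct : List Char) (R : Nat) (mat : List (List Char)) (kn cn : Nat)
    (hc : cn < mat.length) :
    (PySem.List.pyRange 0 (R : Int) 1).foldl (fun (st2 : List (List Char) × Int) _row =>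
        (PySem.List.pySetD st2.1 ((cn : Nat) : Int)
          (PySem.List.pyGetD st2.1 ((cn : Nat) : Int) [] ++ [(PySem.List.pyGet? ct st2.2).getD ' ']),
          st2.2 + 1)) (mat, (kn : Int))
      = (mat.set cn (mat.getD cn [] ++ pvChunk ct kn R), ((kn + R : Nat) : Int)) := by
  induction R with
  | zero =>
    simp only [PySem.List.pyRange_zero_nat, List.foldl_nil, pvChunk, List.range_zero,
      List.map_nil, List.append_nil, Nat.add_zero]
    rw [List.getD_eq_getElem?_getD, List.getElem?_eq_getElem hc]
    simp [List.set_getElem_self]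
  | succ R ih =>
    have hcast : ((R + 1 : Nat) : Int) = (R : Int) + 1 := by push_cast; ring
    rw [hcast, PySem.List.pyRange_one_succ_right (by positivity), List.foldl_append, ih]
    simp only [List.foldl_cons, List.foldl_nil, PySem.List.pySetD_natCast, PySem.List.pyGetD_natCast]
    rw [Prod.mk.injEq]
    refine ⟨?_, by push_cast; ring⟩
    rw [List.set_set]
    congr 1
    have hG : (mat.set cn (mat.getD cn [] ++ pvChunk ct kn R)).getD cn [] =
        mat.getD cn [] ++ pvChunk ct kn R := by
      rw [List.getD_eq_getElem?_getD, List.getElem?_set]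
      simp [hc]
    rw [hG, List.append_assoc]
    congr 1
    have hget : (PySem.List.pyGet? ct ((kn : Int) + (R : Int))).getD ' ' = ct[kn + R]?.getD ' ' := by
      have h2 : (kn : Int) + (R : Int) = ((kn + R : Nat) : Int) := by push_cast; ring
      rw [h2, PySem.List.pyGet?_natCast]
    simp [pvChunk, List.range_succ, hget, List.getD_eq_getElem?_getD]

-- A's column loop, as its state-transformer
def pvOuterStep (ct : List Char) (R : Nat) : (List (List Char) × Int) → Int → (List (List Char) × Int) :=
  fun st col =>
    (PySem.List.pyRange 0 (R : Int) 1).foldl (fun (st2 : List (List Char) × Int) _row =>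
      let c := (PySem.List.pyGet? ct st2.2).getD ' '
      (PySem.List.pySetD st2.1 col (PySem.List.pyGetD st2.1 col [] ++ [c]), st2.2 + 1)) st

-- after A's double loop, column c holds the chunk at position (idxOf c) of the order
theorem pv_outer (ct : List Char) (R M : Nat) :
    ∀ (os : List Int) (mat : List (List Char)) (kn : Nat),
    (∀ x ∈ os, ∃ c : Nat, x = (c : Int) ∧ c < M) → os.Nodup → mat.length = M →
    (os.foldl (pvOuterStep ct R) (mat, (kn : Int))).1.length = M ∧
    ∀ c : Nat, c < M →
      (os.foldl (pvOuterStep ct R) (mat, (kn : Int))).1.getD c [] =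
        if (c : Int) ∈ os then
          mat.getD c [] ++ pvChunk ct (kn + os.idxOf (c : Int) * R) R
        else mat.getD c [] := by
  intro os
  induction os with
  | nil =>
    intro mat kn _ _ hlen
    simp [hlen]
  | cons col os' ih =>
    intro mat kn hb hnd hlen
    obtain ⟨c0, rfl, hc0⟩ := hb _ List.mem_cons_self
    have hstep : pvOuterStep ct R (mat, (kn : Int)) ((c0 : Nat) : Int) =
        (mat.set c0 (mat.getD c0 [] ++ pvChunk ct kn R), ((kn + R : Nat) : Int)) :=
      pv_inner ct R mat kn c0 (by omega)
    have hnotmem : ((c0 : Nat) : Int) ∉ os' := (List.nodup_cons.mp hnd).1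
    have hnd' : os'.Nodup := (List.nodup_cons.mp hnd).2
    have hb' : ∀ x ∈ os', ∃ c : Nat, x = (c : Int) ∧ c < M := fun x hx => hb x (List.mem_cons_of_mem _ hx)
    have hlen1 : (mat.set c0 (mat.getD c0 [] ++ pvChunk ct kn R)).length = M := by
      simp [hlen]
    obtain ⟨ihlen, ihget⟩ := ih (mat.set c0 (mat.getD c0 [] ++ pvChunk ct kn R)) (kn + R) hb' hnd' hlen1
    rw [List.foldl_cons, hstep]
    refine ⟨ihlen, ?_⟩
    intro c hc
    rw [ihget c hc]
    by_cases hmem : (c : Int) ∈ os'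
    · have hne : c ≠ c0 := fun h => hnotmem (h ▸ hmem)
      have hgd : (mat.set c0 (mat.getD c0 [] ++ pvChunk ct kn R)).getD c [] = mat.getD c [] := by
        rw [List.getD_eq_getElem?_getD, List.getElem?_set]
        simp [Ne.symm hne, List.getD_eq_getElem?_getD]
      rw [if_pos hmem, if_pos (List.mem_cons_of_mem _ hmem), hgd]
      have hidx : List.idxOf ((c : Nat) : Int) (((c0 : Nat) : Int) :: os') =
          List.idxOf ((c : Nat) : Int) os' + 1 := by
        rw [List.idxOf_cons_ne]
        exact fun h => hne (by exact_mod_cast h.symm)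
      rw [hidx]
      have harith : kn + R + List.idxOf ((c : Nat) : Int) os' * R =
          kn + (List.idxOf ((c : Nat) : Int) os' + 1) * R := by ring
      rw [harith]
    · rw [if_neg hmem]
      by_cases hceq : c = c0
      · subst hceq
        have hgd : (mat.set c (mat.getD c [] ++ pvChunk ct kn R)).getD c [] =
            mat.getD c [] ++ pvChunk ct kn R := by
          rw [List.getD_eq_getElem?_getD, List.getElem?_set]
          simp [hlen ▸ hc, List.getD_eq_getElem?_getD]
        rw [hgd, if_pos List.mem_cons_self, List.idxOf_cons_self]
        simp
      · have hgd : (mat.set c0 (mat.getD c0 [] ++ pvChunk ct kn R)).getD c [] = mat.getD c [] := by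
          rw [List.getD_eq_getElem?_getD, List.getElem?_set]
          simp [Ne.symm hceq, List.getD_eq_getElem?_getD]
        rw [hgd, if_neg]
        simp only [List.mem_cons]
        push Not
        exact ⟨fun h => hceq (by exact_mod_cast h), hmem⟩

-- B's inversion loop: inv[c] ends as the position of column c in the order
theorem pv_inv (M : Nat) :
    ∀ (os : List Int) (s : Nat) (inv0 : List Int),
    (∀ x ∈ os, ∃ c : Nat, x = (c : Int) ∧ c < M) → os.Nodup → inv0.length = M →
    ((PySem.List.enumerate os (s : Int)).foldl
        (fun inv p => PySem.List.pySetD inv p.2 p.1) inv0).length = M ∧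
    ∀ c : Nat, c < M →
      ((PySem.List.enumerate os (s : Int)).foldl
          (fun inv p => PySem.List.pySetD inv p.2 p.1) inv0).getD c 0 =
        if (c : Int) ∈ os then ((s + os.idxOf (c : Int) : Nat) : Int) else inv0.getD c 0 := by
  intro os
  induction os with
  | nil =>
    intro s inv0 _ _ hlen
    simp [PySem.List.enumerate, hlen]
  | cons col os' ih =>
    intro s inv0 hb hnd hlen
    obtain ⟨c0, rfl, hc0⟩ := hb _ List.mem_cons_self
    have henum : PySem.List.enumerate (((c0 : Nat) : Int) :: os') ((s : Nat) : Int) =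
        (((s : Nat) : Int), ((c0 : Nat) : Int)) :: PySem.List.enumerate os' ((s + 1 : Nat) : Int) := by
      push_cast
      simp [PySem.List.enumerate]
    rw [henum, List.foldl_cons]
    have hstep : PySem.List.pySetD inv0 ((c0 : Nat) : Int) ((s : Nat) : Int) =
        inv0.set c0 ((s : Nat) : Int) := by
      rw [PySem.List.pySetD_natCast]
    rw [hstep]
    have hnotmem : ((c0 : Nat) : Int) ∉ os' := (List.nodup_cons.mp hnd).1
    have hnd' : os'.Nodup := (List.nodup_cons.mp hnd).2
    have hb' : ∀ x ∈ os', ∃ c : Nat, x = (c : Int) ∧ c < M :=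
      fun x hx => hb x (List.mem_cons_of_mem _ hx)
    have hlen1 : (inv0.set c0 ((s : Nat) : Int)).length = M := by simp [hlen]
    obtain ⟨ihlen, ihget⟩ := ih (s + 1) (inv0.set c0 ((s : Nat) : Int)) hb' hnd' hlen1
    refine ⟨ihlen, ?_⟩
    intro c hc
    rw [ihget c hc]
    by_cases hmem : (c : Int) ∈ os'
    · have hne : c ≠ c0 := fun h => hnotmem (h ▸ hmem)
      rw [if_pos hmem, if_pos (List.mem_cons_of_mem _ hmem),
        List.idxOf_cons_ne _ (fun h => hne (by exact_mod_cast h.symm))]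
      congr 1
      omega
    · rw [if_neg hmem]
      by_cases hceq : c = c0
      · subst hceq
        have hgd : (inv0.set c ((s : Nat) : Int)).getD c 0 = ((s : Nat) : Int) := by
          rw [List.getD_eq_getElem?_getD, List.getElem?_set]
          simp [hlen ▸ hc]
        rw [hgd, if_pos List.mem_cons_self, List.idxOf_cons_self]
        simp
      · have hgd : (inv0.set c0 ((s : Nat) : Int)).getD c 0 = inv0.getD c 0 := by
          rw [List.getD_eq_getElem?_getD, List.getElem?_set]
          simp [Ne.symm hceq, List.getD_eq_getElem?_getD]
        rw [hgd, if_neg]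
        simp only [List.mem_cons]
        push Not
        exact ⟨fun h => hceq (by exact_mod_cast h), hmem⟩

theorem pv_min_fold (l : List (List Char)) (a : Nat) (h : ∀ t ∈ l, t.length = a) :
    l.foldl (fun a' t => min a' t.length) a = a := by
  induction l with
  | nil => rfl
  | cons t l ih =>
    rw [List.foldl_cons, h t List.mem_cons_self, min_self]
    exact ih (fun u hu => h u (List.mem_cons_of_mem _ hu))

theorem pv_flatten {α : Type} (M : Nat) (g : Nat → List α) (h : Nat → α) :
    ∀ R : Nat, (∀ i, i < R → g i = (List.range M).map (fun j => h (i * M + j))) →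
    ((List.range R).map g).flatten = (List.range (R * M)).map h := by
  intro R
  induction R with
  | zero => intro _; simp
  | succ R ih =>
    intro hg
    rw [List.range_succ, List.map_append, List.flatten_append,
      ih (fun i hi => hg i (by omega)), Nat.succ_mul, List.range_add, List.map_append,
      List.map_map]
    simp only [List.map_cons, List.map_nil, List.flatten_cons, List.flatten_nil,
      List.append_nil]
    rw [hg R (by omega)]
    rfl

theorem pv_map_eq_range {α β : Type} (l : List α) (M : Nat) (hl : l.length = M)
    (f : α → β) (d : α) :
    l.map f = (List.range M).map (fun c => f (l.getD c d)) := by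
  apply List.ext_getElem
  · simp [hl]
  · intro i h1 h2
    simp only [List.getElem_map, List.getElem_range]
    congr 1
    rw [List.getD_eq_getElem?_getD, List.getElem?_eq_getElem (by simp at h1; omega)]
    rfl

theorem pv_getD_nil (l : List (List Char)) (h : ∀ t ∈ l, t = []) (c : Nat) :
    l.getD c [] = [] := by
  rw [List.getD_eq_getElem?_getD]
  rcases hg : l[c]? with _ | t
  · rfl
  · exact h t (List.mem_of_getElem? hg)

theorem pv_chunk_getD (ct : List Char) (a R r : Nat) (hr : r < R) :
    (pvChunk ct a R).getD r ' ' = ct.getD (a + r) ' ' := by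
  rw [List.getD_eq_getElem?_getD, pvChunk, List.getElem?_map, List.getElem?_range hr]
  rfl

theorem pv_chunk_length (ct : List Char) (a R : Nat) : (pvChunk ct a R).length = R := by
  simp [pvChunk]

-- pvDecryptA re-stated through pvOuterStep (definitional once num_rows is evaluated)
theorem pvDecryptA_eq (ct : List Char) (order : List Int) (M R : Nat)
    (hR : PySem.Int.floordiv ((ct.length : Nat) : Int) ((M : Nat) : Int) = (R : Int)) :
    pvDecryptA (String.ofList ct) order ((M : Nat) : Int) =
      String.ofList
        ((List.range
          (match (order.foldl (pvOuterStep ct R)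
              ((PySem.List.pyRange 0 ((M : Nat) : Int) 1).map (fun _ => ([] : List Char)),
                (0 : Int))).1 with
            | [] => 0
            | s :: rest => rest.foldl (fun a t => min a t.length) s.length)).map
          (fun r => (order.foldl (pvOuterStep ct R)
              ((PySem.List.pyRange 0 ((M : Nat) : Int) 1).map (fun _ => ([] : List Char)),
                (0 : Int))).1.map (fun s => s.getD r ' '))).flatten := by
  simp only [pvDecryptA, String.toList_ofList, hR]
  rfl

-- core: for any divisor column count and any permutation of its columns,
-- A's decrypt equals B's inverse-permutation gather
theorem pv_core (ct : List Char) (M R : Nat) (hM : 2 ≤ M) (hMR : M * R = ct.length)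
    (order : List Int) (hperm : order.Perm (PySem.List.pyRange 0 ((M : Nat) : Int) 1)) :
    pvDecryptA (String.ofList ct) order ((M : Nat) : Int) =
      String.ofList ((PySem.List.pyRange 0 ((ct.length : Nat) : Int) 1).map (fun p =>
        (PySem.List.pyGet? ct
          (PySem.List.pyGetD
            ((PySem.List.enumerate order 0).foldl
              (fun inv q => PySem.List.pySetD inv q.2 q.1)
              (List.replicate ((M : Nat) : Int).toNat (0 : Int)))
            (PySem.Int.mod p ((M : Nat) : Int)) 0
            * PySem.Int.floordiv ((ct.length : Nat) : Int) ((M : Nat) : Int)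
            + PySem.Int.floordiv p ((M : Nat) : Int))).getD ' ')) := by
  have hM0 : 0 < M := by omega
  have hb : ∀ x ∈ order, ∃ c : Nat, x = (c : Int) ∧ c < M := by
    intro x hx
    have hx2 := hperm.mem_iff.mp hx
    rw [PySem.List.mem_pyRange_one] at hx2
    exact ⟨x.toNat, by omega, by omega⟩
  have hnd : order.Nodup := hperm.nodup_iff.mpr (PySem.List.nodup_pyRange_one _ _)
  have hcov : ∀ c : Nat, c < M → (c : Int) ∈ order := by
    intro c hc
    refine hperm.mem_iff.mpr ?_
    rw [PySem.List.mem_pyRange_one]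
    constructor
    · positivity
    · exact_mod_cast hc
  have hR : PySem.Int.floordiv ((ct.length : Nat) : Int) ((M : Nat) : Int) = (R : Int) := by
    rw [← hMR, PySem.Int.floordiv_natCast, Nat.mul_div_cancel_left R hM0]
  -- A side
  rw [pvDecryptA_eq ct order M R hR]
  have hm0len : ((PySem.List.pyRange 0 ((M : Nat) : Int) 1).map
      (fun _ => ([] : List Char))).length = M := by
    rw [List.length_map, PySem.List.length_pyRange_one]
    omega
  obtain ⟨hmlen, hmget⟩ := pv_outer ct R M order
    ((PySem.List.pyRange 0 ((M : Nat) : Int) 1).map (fun _ => ([] : List Char))) 0 hb hnd hm0len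
  have hm0getD : ∀ c : Nat, ((PySem.List.pyRange 0 ((M : Nat) : Int) 1).map
      (fun _ => ([] : List Char))).getD c [] = [] := by
    intro c
    exact pv_getD_nil _ (by intro t ht; simp at ht; exact ht.2) c
  have hmget' : ∀ c : Nat, c < M →
      (order.foldl (pvOuterStep ct R)
        ((PySem.List.pyRange 0 ((M : Nat) : Int) 1).map (fun _ => ([] : List Char)),
          ((0 : Nat) : Int))).1.getD c [] = pvChunk ct (order.idxOf ((c : Nat) : Int) * R) R := by
    intro c hc
    rw [hmget c hc, if_pos (hcov c hc), hm0getD c]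
    simp
  -- every row of the matrix has length R
  have hrowlen : ∀ t ∈ (order.foldl (pvOuterStep ct R)
      ((PySem.List.pyRange 0 ((M : Nat) : Int) 1).map (fun _ => ([] : List Char)),
        ((0 : Nat) : Int))).1, t.length = R := by
    intro t ht
    obtain ⟨i, hi, hti⟩ := List.mem_iff_getElem.mp ht
    have hiM : i < M := by omega
    have hgd : (order.foldl (pvOuterStep ct R)
        ((PySem.List.pyRange 0 ((M : Nat) : Int) 1).map (fun _ => ([] : List Char)),
          ((0 : Nat) : Int))).1.getD i [] = t := by
      rw [List.getD_eq_getElem?_getD, List.getElem?_eq_getElem hi, Option.getD_some, hti]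
    have ht2 : t = pvChunk ct (order.idxOf ((i : Nat) : Int) * R) R := by
      rw [← hgd, hmget' i hiM]
    rw [ht2, pv_chunk_length]
  set mat := (order.foldl (pvOuterStep ct R)
      ((PySem.List.pyRange 0 ((M : Nat) : Int) 1).map (fun _ => ([] : List Char)),
        ((0 : Nat) : Int))).1 with hmatdef
  simp only [Nat.cast_zero] at hmatdef
  rw [← hmatdef]
  obtain ⟨s0, rest, hmc⟩ : ∃ s0 rest, mat = s0 :: rest := by
    rcases hmc2 : mat with _ | ⟨s0, rest⟩
    · rw [hmc2] at hmlen
      simp at hmlen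
      omega
    · exact ⟨s0, rest, rfl⟩
  rw [hmc] at hmlen hmget' hrowlen ⊢
  have hs0 : s0.length = R := hrowlen s0 List.mem_cons_self
  have hrest : ∀ t ∈ rest, t.length = s0.length := by
    intro t htr
    rw [hs0]
    exact hrowlen t (List.mem_cons_of_mem _ htr)
  have hminlen : (match s0 :: rest with
      | [] => 0
      | s :: rest => rest.foldl (fun a t => min a t.length) s.length) = R := by
    show rest.foldl (fun a t => min a t.length) s0.length = R
    rw [pv_min_fold rest s0.length hrest, hs0]
  rw [hminlen]
  congr 1
  -- close both sides against the common gather expression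
  rw [pv_flatten M (fun r => (s0 :: rest).map (fun s => s.getD r ' '))
    (fun p => ct.getD (order.idxOf (((p % M : Nat)) : Int) * R + p / M) ' ') R ?hg]
  case hg =>
    intro r hr
    beta_reduce
    rw [pv_map_eq_range (s0 :: rest) M hmlen _ []]
    apply List.map_congr_left
    intro j hj
    have hjM : j < M := List.mem_range.mp hj
    have e1 : (r * M + j) % M = j := by
      rw [Nat.mul_comm r M, Nat.mul_add_mod, Nat.mod_eq_of_lt hjM]
    have e2 : (r * M + j) / M = r := by
      rw [Nat.mul_comm r M, Nat.mul_add_div hM0, Nat.div_eq_of_lt hjM, Nat.add_zero]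
    simp only [e1, e2]
    rw [hmget' j hjM, pv_chunk_getD ct _ R r hr]
  -- B side
  obtain ⟨hinvlen, hinvget⟩ := pv_inv M order 0 (List.replicate M 0) hb hnd (by simp)
  simp only [Nat.cast_zero] at hinvget
  rw [PySem.List.pyRange_one]
  simp only [Int.sub_zero, Int.toNat_natCast, List.map_map]
  have hn : ct.length = R * M := by rw [← hMR, Nat.mul_comm]
  rw [hn]
  apply List.map_congr_left
  intro p hp
  have hpn : p < ct.length := by
    rw [hn]
    exact List.mem_range.mp hp
  have hR' : PySem.Int.floordiv (((R * M : Nat)) : Int) ((M : Nat) : Int) = (R : Int) := by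
    rw [PySem.Int.floordiv_natCast, Nat.mul_div_cancel R hM0]
  simp only [Function.comp_apply, zero_add, hR']
  rw [PySem.Int.mod_natCast p M, PySem.Int.floordiv_natCast p M, PySem.List.pyGetD_natCast]
  have hget : (List.foldl (fun inv q => PySem.List.pySetD inv q.2 q.1)
      (List.replicate M (0 : Int)) (PySem.List.enumerate order 0)).getD (p % M) 0 =
      ((order.idxOf (((p % M : Nat)) : Int) : Nat) : Int) := by
    rw [hinvget (p % M) (Nat.mod_lt p hM0), if_pos (hcov (p % M) (Nat.mod_lt p hM0))]
    norm_num
  rw [hget]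
  have hidxcast : ((order.idxOf (((p % M : Nat)) : Int) : Nat) : Int) * ((R : Nat) : Int)
      + ((p / M : Nat) : Int)
      = ((order.idxOf (((p % M : Nat)) : Int) * R + p / M : Nat) : Int) := by
    push_cast
    ring
  rw [hidxcast, PySem.List.pyGet?_natCast]
  rw [List.getD_eq_getElem?_getD]

-- ===== VERDICT (by name: the statement is the Claim_ definition above) =====
theorem brute_force_columnar_transposition_spec : Claim_equal_brute_force_columnar_transposition := by
  intro ciphertext _hdom
  unfold Spec_brute_force_columnar_transposition
  simp only [brute_force_columnar_transposition, brute_force_columnar_transposition_alt]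
  refine PySem.List.foldl_congr_mem _ _ _ _ ?_
  intro acc m hm
  rw [PySem.List.mem_pyRange_one] at hm
  by_cases hmod : PySem.Int.mod ((ciphertext.toList.length : Nat) : Int) m = 0
  · rw [if_pos hmod, if_pos hmod]
    obtain ⟨M, rfl⟩ : ∃ M : Nat, m = ((M : Nat) : Int) := ⟨m.toNat, by omega⟩
    have hM2 : 2 ≤ M := by omega
    have hmod' : ciphertext.toList.length % M = 0 := by
      rw [PySem.Int.mod_natCast] at hmod
      exact_mod_cast hmod
    have hdvd : M ∣ ciphertext.toList.length := Nat.dvd_of_mod_eq_zero hmod'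
    have hMR : M * (ciphertext.toList.length / M) = ciphertext.toList.length :=
      Nat.mul_div_cancel' hdvd
    rw [PySem.List.foldl_append_singleton_eq_map, PySem.List.foldl_append_singleton_eq_map]
    congr 1
    apply List.map_congr_left
    intro order horder
    have hperm := pvPermutations_perm _ order horder
    have hcore := pv_core ciphertext.toList M (ciphertext.toList.length / M) hM2 hMR order hperm
    rw [String.ofList_toList] at hcore
    rw [hcore]
  · rw [if_neg hmod, if_neg hmod]
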